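-- pv_equiv track=rewrite | github.com/xchuwenbo/realseries | realseries/utils/visualize.py | _get_contiu_index
-- ===== SOURCE A (Python) =====
-- def _get_contiu_index(arr):
--     """return the start and end index of a continuous intrval with 0 and 1.
--     """
--     from itertools import groupby
--     result = []
--     fun = lambda x: x[1] - x[0]
--     for k, g in groupby(enumerate(arr), fun):
--         temp = [j for i, j in g]
--         result.append((min(temp), max(temp)))
--     return result
-- ===== SOURCE B (Python) =====
-- def _get_contiu_index(arr):
--     """return the start and end index of a continuous intrval with 0 and 1."""
--     if not arr:
--         return []
--     result = []
--     start = arr[0]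
--     prev = arr[0]
--     for x in arr[1:]:
--         if x != prev + 1:
--             result.append((start, prev))
--             start = x
--         prev = x
--     result.append((start, prev))
--     return result
-- ===== Notes on version B (the rewrite author's own statement) =====
-- stated objective: simpler
-- what changed: Replaces itertools.groupby on enumerate(arr) keyed by value-minus-index (which materializes each group as a list and reduces it with min/max) by a direct forward pass that tracks only the current run's start and previous value and emits (start, prev) at each break.
import Mathlib
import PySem

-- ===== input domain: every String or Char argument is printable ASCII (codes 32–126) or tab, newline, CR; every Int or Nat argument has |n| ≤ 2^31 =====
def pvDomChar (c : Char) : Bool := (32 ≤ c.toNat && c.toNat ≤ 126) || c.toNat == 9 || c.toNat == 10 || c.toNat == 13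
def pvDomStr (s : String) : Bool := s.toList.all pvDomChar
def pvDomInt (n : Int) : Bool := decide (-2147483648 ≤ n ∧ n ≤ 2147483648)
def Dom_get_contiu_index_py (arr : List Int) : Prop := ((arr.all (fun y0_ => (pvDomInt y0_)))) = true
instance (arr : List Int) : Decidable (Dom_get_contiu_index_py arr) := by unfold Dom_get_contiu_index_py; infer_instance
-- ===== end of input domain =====

-- B replaces groupby-on-enumerate with group materialization + min/max by a
-- single forward pass tracking only run endpoints (objective: simpler).


-- ===== PORT A =====
-- enumerate(arr) starting at index n
def pvEnumFrom (n : Int) : List Int → List (Int × Int)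
  | [] => []
  | x :: xs => (n, x) :: pvEnumFrom (n + 1) xs

-- Python min(l)/max(l) for the (always nonempty) group value lists
def pvMin (l : List Int) : Int := l.tail.foldl min (l.headD 0)
def pvMax (l : List Int) : Int := l.tail.foldl max (l.headD 0)

-- itertools.groupby with key fun (i, j) ↦ j - i; cur is the group being built
def pvGroupAux (key : Int) (cur : List (Int × Int)) : List (Int × Int) → List (List (Int × Int))
  | [] => [cur]
  | x :: xs =>
      if x.2 - x.1 = key then pvGroupAux key (cur ++ [x]) xs
      else cur :: pvGroupAux (x.2 - x.1) [x] xs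

def get_contiu_index_py (arr : List Int) : List (Int × Int) :=
  match pvEnumFrom 0 arr with
  | [] => []
  | x :: xs =>
      (pvGroupAux (x.2 - x.1) [x] xs).map
        (fun g => let temp := g.map Prod.snd; (pvMin temp, pvMax temp))

-- ===== PORT B =====
def pvAltLoop (start prev : Int) : List Int → List (Int × Int)
  | [] => [(start, prev)]
  | x :: xs => if x ≠ prev + 1 then (start, prev) :: pvAltLoop x x xs
               else pvAltLoop start x xs

def get_contiu_index_py_alt (arr : List Int) : List (Int × Int) :=
  match arr with
  | [] => []
  | x :: xs => pvAltLoop x x xs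

-- ===== PRECONDITION & SPEC =====
def Spec_get_contiu_index_py (arr : List Int) (out : List (Int × Int)) : Prop := out = get_contiu_index_py_alt arr
instance (arr : List Int) (out : List (Int × Int)) : Decidable (Spec_get_contiu_index_py arr out) := by unfold Spec_get_contiu_index_py; infer_instance

-- ===== CLAIM (what is proved, stated in full; the proofs are below) =====
def Claim_equal_get_contiu_index_py : Prop := ∀ (arr : List Int), Dom_get_contiu_index_py arr → Spec_get_contiu_index_py arr (get_contiu_index_py arr)

-- ===== LEMMAS AND PROOFS =====

theorem pvMin_append (l : List Int) (x : Int) (h : l ≠ []) :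
    pvMin (l ++ [x]) = min (pvMin l) x := by
  cases l with
  | nil => exact absurd rfl h
  | cons a t => simp [pvMin, List.foldl_append]

theorem pvMax_append (l : List Int) (x : Int) (h : l ≠ []) :
    pvMax (l ++ [x]) = max (pvMax l) x := by
  cases l with
  | nil => exact absurd rfl h
  | cons a t => simp [pvMax, List.foldl_append]

theorem pvGroup_main (xs : List Int) : ∀ (n start prev : Int) (cur : List (Int × Int)),
    cur ≠ [] →
    pvMin (cur.map Prod.snd) = start →
    pvMax (cur.map Prod.snd) = prev →
    start ≤ prev →
    (pvGroupAux (prev - (n - 1)) cur (pvEnumFrom n xs)).map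
      (fun g => let temp := g.map Prod.snd; (pvMin temp, pvMax temp))
      = pvAltLoop start prev xs := by
  induction xs with
  | nil =>
    intro n start prev cur _ hmin hmax _
    simp [pvEnumFrom, pvGroupAux, pvAltLoop, hmin, hmax]
  | cons x xs ih =>
    intro n start prev cur hne hmin hmax hle
    simp only [pvEnumFrom, pvGroupAux]
    by_cases hx : x = prev + 1
    · have hk : x - n = prev - (n - 1) := by omega
      rw [if_pos hk]
      have hcur : cur.map Prod.snd ≠ [] := by
        cases cur with
        | nil => exact absurd rfl hne
        | cons a t => simp
      have h1 : ((cur ++ [(n, x)]).map Prod.snd) = cur.map Prod.snd ++ [x] := by simp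
      have hmin' : pvMin ((cur ++ [(n, x)]).map Prod.snd) = start := by
        rw [h1, pvMin_append _ _ hcur, hmin]; omega
      have hmax' : pvMax ((cur ++ [(n, x)]).map Prod.snd) = x := by
        rw [h1, pvMax_append _ _ hcur, hmax]; omega
      have := ih (n + 1) start x (cur ++ [(n, x)]) (by simp) hmin' hmax' (by omega)
      have hk2 : prev - (n - 1) = x - (n + 1 - 1) := by omega
      rw [hk2, this]
      simp [pvAltLoop, hx]
    · have hk : ¬ (x - n = prev - (n - 1)) := by omega
      rw [if_neg hk]
      have := ih (n + 1) x x [(n, x)] (by simp) (by simp [pvMin]) (by simp [pvMax]) le_rfl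
      have hk2 : x - n = x - (n + 1 - 1) := by omega
      simp only [List.map_cons]
      rw [hk2, this]
      simp [pvAltLoop, hx, hmin, hmax]

-- ===== VERDICT (by name: the statement is the Claim_ definition above) =====
theorem get_contiu_index_py_spec : Claim_equal_get_contiu_index_py := by
  intro arr _
  unfold Spec_get_contiu_index_py get_contiu_index_py get_contiu_index_py_alt
  cases arr with
  | nil => simp [pvEnumFrom]
  | cons x xs =>
    simp only [pvEnumFrom]
    have := pvGroup_main xs 1 x x [(0, x)] (by simp) (by simp [pvMin]) (by simp [pvMax]) le_rfl
    simpa using this
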